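-- pv_equiv track=rewrite | github.com/ShuklaGroup/Strigolactone-Apo-Activation | contact_analysis/compare_contact_freq.py | get_sequence_alignment
-- ===== SOURCE A (Python) =====
-- def get_sequence_alignment(nres1, shift=4):
--     #TODO: Implement functionality to read alignment from FASTA files
--     #For now this is temporarily hacked purely for AtD14 (seq1)/ShHTL7(seq2)
--     #Returns len seq1 vector containing corresponding resids from seq2
--
--     alignment = []
--     for i in range(nres1):
--         if i+shift < 169:
--             alignment.append(i-2+shift)
--         else:
--             alignment.append(i-1+shift)
--
--     return alignment
-- ===== SOURCE B (Python) =====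
-- def get_sequence_alignment(nres1, shift=4):
--     # Branch-free: split index where i+shift crosses 169, then two arithmetic ranges.
--     n1 = max(0, min(169 - shift, nres1))
--     return list(range(shift - 2, n1 + shift - 2)) + list(range(n1 + shift - 1, nres1 + shift - 1))
-- ===== Notes on version B (the rewrite author's own statement) =====
-- stated objective: simpler
-- what changed: Replaces the per-element branch-in-loop with a closed-form split index and a concatenation of two arithmetic ranges built directly by range().
import Mathlib
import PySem

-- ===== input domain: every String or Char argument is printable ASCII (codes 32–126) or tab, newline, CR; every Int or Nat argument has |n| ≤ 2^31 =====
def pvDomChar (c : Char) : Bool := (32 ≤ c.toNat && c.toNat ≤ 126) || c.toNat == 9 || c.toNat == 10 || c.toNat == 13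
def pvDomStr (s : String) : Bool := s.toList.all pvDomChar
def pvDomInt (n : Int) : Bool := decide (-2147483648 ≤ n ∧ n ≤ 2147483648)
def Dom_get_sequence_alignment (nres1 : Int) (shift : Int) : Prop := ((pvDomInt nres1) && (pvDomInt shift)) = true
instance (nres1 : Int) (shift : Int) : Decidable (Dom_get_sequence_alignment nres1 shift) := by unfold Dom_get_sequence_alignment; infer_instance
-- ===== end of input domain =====

-- B replaces the per-element branch with a split index and two arithmetic ranges (objective: simpler).

-- ===== PORT A =====
def get_sequence_alignment (nres1 : Int) (shift : Int) : List Int :=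
  (PySem.List.pyRange 0 nres1 1).foldl
    (fun alignment i =>
      if i + shift < 169 then alignment ++ [i - 2 + shift]
      else alignment ++ [i - 1 + shift]) []

-- ===== PORT B =====
def get_sequence_alignment_alt (nres1 : Int) (shift : Int) : List Int :=
  let n1 := max 0 (min (169 - shift) nres1)
  PySem.List.pyRange (shift - 2) (n1 + shift - 2) 1 ++
    PySem.List.pyRange (n1 + shift - 1) (nres1 + shift - 1) 1

-- ===== PRECONDITION & SPEC =====
def Spec_get_sequence_alignment (nres1 : Int) (shift : Int) (out : List Int) : Prop := out = get_sequence_alignment_alt nres1 shift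
instance (nres1 : Int) (shift : Int) (out : List Int) : Decidable (Spec_get_sequence_alignment nres1 shift out) := by unfold Spec_get_sequence_alignment; infer_instance

-- ===== CLAIM (what is proved, stated in full; the proofs are below) =====
def Claim_equal_get_sequence_alignment : Prop := ∀ (nres1 : Int) (shift : Int), Dom_get_sequence_alignment nres1 shift → Spec_get_sequence_alignment nres1 shift (get_sequence_alignment nres1 shift)

-- ===== LEMMAS AND PROOFS =====

theorem foldl_snoc_eq_map (g : Int → Int) (l : List Int) (acc : List Int) :
    l.foldl (fun a i => a ++ [g i]) acc = acc ++ l.map g := by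
  induction l generalizing acc with
  | nil => simp
  | cons x xs ih => simp [List.foldl, ih]

theorem get_sequence_alignment_eq_map (nres1 shift : Int) :
    get_sequence_alignment nres1 shift =
      (PySem.List.pyRange 0 nres1 1).map
        (fun i => if i + shift < 169 then i - 2 + shift else i - 1 + shift) := by
  unfold get_sequence_alignment
  rw [show (fun (alignment : List Int) (i : Int) =>
        if i + shift < 169 then alignment ++ [i - 2 + shift]
        else alignment ++ [i - 1 + shift]) =
      (fun (a : List Int) (i : Int) =>
        a ++ [if i + shift < 169 then i - 2 + shift else i - 1 + shift]) from by
    funext a i; split <;> rfl]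
  exact foldl_snoc_eq_map _ _ []

-- ===== VERDICT (by name: the statement is the Claim_ definition above) =====
theorem get_sequence_alignment_spec : Claim_equal_get_sequence_alignment := by
  intro nres1 shift _
  unfold Spec_get_sequence_alignment get_sequence_alignment_alt
  rw [get_sequence_alignment_eq_map]
  set n1 := max 0 (min (169 - shift) nres1) with hn1
  apply List.ext_getElem
  · simp [PySem.List.length_pyRange_one]
    omega
  · intro k hk1 hk2
    have hkn : (k : Int) < nres1 := by
      simp [PySem.List.length_pyRange_one] at hk1
      omega
    rw [List.getElem_map, PySem.List.getElem_pyRange_one]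
    rcases lt_or_ge k (PySem.List.pyRange (shift - 2) (n1 + shift - 2) 1).length with h | h
    · rw [List.getElem_append_left h, PySem.List.getElem_pyRange_one]
      have : (k : Int) < n1 := by
        simp [PySem.List.length_pyRange_one] at h
        omega
      have : (0 : Int) + k + shift < 169 := by omega
      simp only [if_pos this]
      omega
    · rw [List.getElem_append_right h, PySem.List.getElem_pyRange_one]
      have hlen : (PySem.List.pyRange (shift - 2) (n1 + shift - 2) 1).length = n1.toNat := by
        simp [PySem.List.length_pyRange_one]
        try omega
      have : ¬ ((0 : Int) + k + shift < 169) := by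
        rw [hlen] at h
        omega
      simp only [if_neg this]
      rw [hlen] at h ⊢
      omega
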